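-- pv_equiv track=rewrite | github.com/Alexbateman1/PfamCuration | DGC/domain_growth.py | _members_to_segments
-- ===== SOURCE A (Python) =====
-- from typing import Dict, List, Optional, Set, Tuple
--
-- def _members_to_segments(
--
--     members: List[int],
--     resnums: List[int],
--     max_gap: int = 20,
-- ) -> List[Tuple[int, int]]:
--     """
--     Convert member indices to residue number segments.
--
--     Stitches together segments separated by gaps up to max_gap residues.
--     This prevents over-fragmentation of domains.
--     """
--     if not members:
--         return []
--
--     segments = []
--     start_resnum = resnums[members[0]]
--     prev_resnum = start_resnum
--
--     for idx in members[1:]: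
--         resnum = resnums[idx]
--
--         # Check for gap > max_gap residues
--         if resnum - prev_resnum > max_gap:
--             segments.append((start_resnum, prev_resnum))
--             start_resnum = resnum
--
--         prev_resnum = resnum
--
--     segments.append((start_resnum, prev_resnum))
--
--     return segments
-- ===== SOURCE B (Python) =====
-- from typing import Dict, List, Optional, Set, Tuple
--
-- def _members_to_segments(
--     members: List[int],
--     resnums: List[int],
--     max_gap: int = 20,
-- ) -> List[Tuple[int, int]]:
--     # Two-pointer run extraction: map to residue numbers once, then repeatedly
--     # take the longest maximal run whose consecutive gaps are all <= max_gap.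
--     r = [resnums[i] for i in members]
--     out = []
--     i, n = 0, len(r)
--     while i < n:
--         j = i
--         while j + 1 < n and r[j + 1] - r[j] <= max_gap:
--             j += 1
--         out.append((r[i], r[j]))
--         i = j + 1
--     return out
-- ===== Notes on version B (the rewrite author's own statement) =====
-- stated objective: alternative
-- what changed: B first maps member indices to residue numbers, then extracts maximal runs with a two-pointer scan (find the end of each run, emit (first,last), jump past it), instead of A's single fold carrying start/prev accumulators and appending a segment at each large gap.
import Mathlib
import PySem

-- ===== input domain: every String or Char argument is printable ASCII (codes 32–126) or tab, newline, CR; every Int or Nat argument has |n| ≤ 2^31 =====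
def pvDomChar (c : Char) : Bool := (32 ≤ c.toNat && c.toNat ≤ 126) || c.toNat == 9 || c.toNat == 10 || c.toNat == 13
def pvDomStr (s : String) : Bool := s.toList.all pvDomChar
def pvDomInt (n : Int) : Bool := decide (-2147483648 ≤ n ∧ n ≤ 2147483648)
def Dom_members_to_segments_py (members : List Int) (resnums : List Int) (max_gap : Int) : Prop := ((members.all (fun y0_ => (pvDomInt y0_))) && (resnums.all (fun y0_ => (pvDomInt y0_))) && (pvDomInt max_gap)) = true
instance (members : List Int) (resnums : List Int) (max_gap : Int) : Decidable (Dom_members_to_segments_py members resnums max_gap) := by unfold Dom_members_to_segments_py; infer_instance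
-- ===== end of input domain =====

-- B replaces A's start/prev accumulator fold by: map indices to residue numbers once,
-- then extract maximal runs (gap <= max_gap) with a two-pointer scan, emitting (first, last) of each run.
-- ===== PORT A =====
def members_to_segments_py (members : List Int) (resnums : List Int) (max_gap : Int) : List (Int × Int) :=
  match members with
  | [] => []
  | m0 :: rest =>
    let start_resnum := (PySem.List.pyGet? resnums m0).getD 0
    let st := rest.foldl (fun (st : List (Int × Int) × Int × Int) idx =>
      let resnum := (PySem.List.pyGet? resnums idx).getD 0
      if resnum - st.2.2 > max_gap then (st.1 ++ [(st.2.1, st.2.2)], resnum, resnum)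
      else (st.1, st.2.1, resnum)) ([], start_resnum, start_resnum)
    st.1 ++ [(st.2.1, st.2.2)]

-- ===== PORT B =====
-- inner while loop of Source B: advance j while the next gap is <= max_gap; returns (r[j], rest after the run)
def pvRunEnd (g : Int) : Int → List Int → Int × List Int
  | p, [] => (p, [])
  | p, y :: ys => if y - p > g then (p, y :: ys) else pvRunEnd g y ys

theorem pvRunEnd_len (g : Int) (xs : List Int) : ∀ p, (pvRunEnd g p xs).2.length ≤ xs.length := by
  induction xs with
  | nil => intro p; simp [pvRunEnd]
  | cons y ys ih =>
    intro p
    simp only [pvRunEnd]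
    split
    · simp
    · exact Nat.le_succ_of_le (ih y)

-- outer while loop of Source B: emit (r[i], r[j]) for each run, continue at j + 1
def pvSegs (g : Int) : List Int → List (Int × Int)
  | [] => []
  | x :: xs =>
    let pr := pvRunEnd g x xs
    (x, pr.1) :: pvSegs g pr.2
termination_by l => l.length
decreasing_by exact Nat.lt_succ_of_le (pvRunEnd_len g xs x)

def members_to_segments_py_alt (members : List Int) (resnums : List Int) (max_gap : Int) : List (Int × Int) :=
  let r := members.map (fun i => (PySem.List.pyGet? resnums i).getD 0)
  pvSegs max_gap r

-- ===== PRECONDITION & SPEC =====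
-- Pre_ excludes exactly the inputs on which A raises IndexError: a member index out of
-- Python range for resnums (negative indices count from the end, as in Python).
def Pre_members_to_segments_py (members : List Int) (resnums : List Int) (max_gap : Int) : Prop :=
  ∀ i ∈ members, PySem.Raise.InRange resnums.length i
instance (members : List Int) (resnums : List Int) (max_gap : Int) : Decidable (Pre_members_to_segments_py members resnums max_gap) := by unfold Pre_members_to_segments_py; infer_instance
def pvWitness_members_to_segments_py : List Int × List Int × Int := ([0, 1, 2], [5, 40, 41], 20)
def Spec_members_to_segments_py (members : List Int) (resnums : List Int) (max_gap : Int) (out : List (Int × Int)) : Prop := out = members_to_segments_py_alt members resnums max_gap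
instance (members : List Int) (resnums : List Int) (max_gap : Int) (out : List (Int × Int)) : Decidable (Spec_members_to_segments_py members resnums max_gap out) := by unfold Spec_members_to_segments_py; infer_instance

-- ===== CLAIM (what is proved, stated in full; the proofs are below) =====
def Claim_equal_members_to_segments_py : Prop := ∀ (members : List Int) (resnums : List Int) (max_gap : Int), Dom_members_to_segments_py members resnums max_gap → Pre_members_to_segments_py members resnums max_gap → Spec_members_to_segments_py members resnums max_gap (members_to_segments_py members resnums max_gap)

-- ===== LEMMAS AND PROOFS =====

-- A's fold (over the residue-number list), finished with the trailing append,
-- equals the accumulated segments followed by B's run extraction from (s, p).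
theorem pv_fold_eq (g : Int) (xs : List Int) : ∀ (segs : List (Int × Int)) (s p : Int),
    (let st := xs.foldl (fun (st : List (Int × Int) × Int × Int) y =>
        if y - st.2.2 > g then (st.1 ++ [(st.2.1, st.2.2)], y, y)
        else (st.1, st.2.1, y)) (segs, s, p)
     st.1 ++ [(st.2.1, st.2.2)])
    = segs ++ (s, (pvRunEnd g p xs).1) :: pvSegs g (pvRunEnd g p xs).2 := by
  induction xs with
  | nil => intro segs s p; simp [pvRunEnd, pvSegs]
  | cons y ys ih =>
    intro segs s p
    by_cases h : y - p > g
    · simp only [List.foldl_cons, pvRunEnd, if_pos h]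
      rw [show pvSegs g (y :: ys) = (y, (pvRunEnd g y ys).1) :: pvSegs g (pvRunEnd g y ys).2 from by rw [pvSegs]]
      simpa [List.append_assoc] using ih (segs ++ [(s, p)]) y y
    · simp only [List.foldl_cons, pvRunEnd, if_neg h]
      exact ih segs s y


-- ===== VERDICT (by name: the statement is the Claim_ definition above) =====
theorem members_to_segments_py_spec : Claim_equal_members_to_segments_py := by
  intro members resnums max_gap _ _
  unfold Spec_members_to_segments_py members_to_segments_py members_to_segments_py_alt
  match members with
  | [] => simp [pvSegs]
  | m0 :: rest =>
    simp only [List.map_cons]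
    rw [pvSegs]
    have h := pv_fold_eq max_gap (rest.map (fun i => (PySem.List.pyGet? resnums i).getD 0)) []
      ((PySem.List.pyGet? resnums m0).getD 0) ((PySem.List.pyGet? resnums m0).getD 0)
    rw [List.foldl_map] at h
    simpa using h
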